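-- pv_equiv track=rewrite | github.com/nguyen-ngocduong/Python | CON5-Ham/Bai12.py | check
-- ===== SOURCE A (Python) =====
-- def check(n):
--     tmp = n
--     tong = 0
--     rev = 0
--     ok = False
--     while n != 0:
--         rev = rev * 10 + n % 10
--         if n % 10 == 6 :
--             ok = True
--         tong += n%10
--         n //= 10
--     return (rev == tmp) and (tong % 10 == 8) and ok
-- ===== SOURCE B (Python) =====
-- def check(n):
--     digits = []
--     m = n
--     while m > 0:
--         digits.append(m % 10)
--         m //= 10
--     return digits == digits[::-1] and sum(digits) % 10 == 8 and 6 in digits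
-- ===== Notes on version B (the rewrite author's own statement) =====
-- stated objective: idiomatic
-- what changed: B collects the digits once into a list and derives all three conditions after the loop (list == reversed slice, sum, membership) instead of A's interleaved accumulators (reversed number, running digit sum, flag); A's non-terminating negative-input loop is excluded by Pre_.
import Mathlib
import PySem

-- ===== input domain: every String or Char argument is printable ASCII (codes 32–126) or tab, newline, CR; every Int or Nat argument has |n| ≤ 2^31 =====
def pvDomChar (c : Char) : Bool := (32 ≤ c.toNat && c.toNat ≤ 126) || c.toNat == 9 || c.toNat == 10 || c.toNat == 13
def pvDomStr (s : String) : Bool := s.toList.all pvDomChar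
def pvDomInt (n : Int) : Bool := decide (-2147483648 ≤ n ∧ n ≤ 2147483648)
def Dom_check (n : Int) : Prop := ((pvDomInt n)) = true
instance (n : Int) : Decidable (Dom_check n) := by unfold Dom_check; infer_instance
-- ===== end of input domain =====

-- B collects the digits into a list once and derives palindrome/sum/membership from it after
-- the loop (objective: idiomatic); same asymptotic cost as A.

-- ===== PORT A =====
-- A's while-loop; the fuel argument only makes the recursion total (n.natAbs bounds the
-- number of iterations for every n ≥ 0, i.e. on all of Pre_check).
def checkLoop : Nat → Int → Int → Int → Bool → Int × Int × Bool
  | 0, _, rev, tong, ok => (rev, tong, ok)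
  | fuel + 1, n, rev, tong, ok =>
    if n ≠ 0 then
      checkLoop fuel (PySem.Int.floordiv n 10) (rev * 10 + PySem.Int.mod n 10)
        (tong + PySem.Int.mod n 10)
        (if PySem.Int.mod n 10 == 6 then true else ok)
    else (rev, tong, ok)

def check (n : Int) : Bool :=
  let tmp := n
  let r := checkLoop n.natAbs n 0 0 false
  (r.1 == tmp) && (PySem.Int.mod r.2.1 10 == 8) && r.2.2

-- ===== PORT B =====
-- B's while-loop: collect the decimal digits (least significant first); fuel as above.
def digitsLoop : Nat → Int → List Int → List Int
  | 0, _, ds => ds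
  | fuel + 1, m, ds =>
    if 0 < m then
      digitsLoop fuel (PySem.Int.floordiv m 10) (ds ++ [PySem.Int.mod m 10])
    else ds

def check_alt (n : Int) : Bool :=
  let ds := digitsLoop n.natAbs n []
  (ds == (PySem.List.slice? ds none none (-1)).getD []) &&
    (PySem.Int.mod ds.sum 10 == 8) && ds.contains 6

-- ===== PRECONDITION & SPEC =====
-- Pre_ excludes n < 0, on which A's while-loop never terminates (n //= 10 stalls at -1).
def Pre_check (n : Int) : Prop := 0 ≤ n
instance (n : Int) : Decidable (Pre_check n) := by unfold Pre_check; infer_instance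
def pvWitness_check : Int := 8

def Spec_check (n : Int) (out : Bool) : Prop := out = check_alt n
instance (n : Int) (out : Bool) : Decidable (Spec_check n out) := by unfold Spec_check; infer_instance

-- ===== CLAIM (what is proved, stated in full; the proofs are below) =====
def Claim_equal_check : Prop := ∀ (n : Int), Dom_check n → Pre_check n → Spec_check n (check n)

-- ===== LEMMAS AND PROOFS =====

-- B's loop appends exactly the little-endian decimal digits of m.
theorem digitsLoop_eq (m : Nat) : ∀ (fuel : Nat), m ≤ fuel → ∀ (ds : List Int),
    digitsLoop fuel (m : Int) ds = ds ++ (Nat.digits 10 m).map (fun d : Nat => (d : Int)) := by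
  induction m using Nat.strong_induction_on with
  | _ m ih =>
    intro fuel hfuel ds
    rcases Nat.eq_zero_or_pos m with hm | hm
    · subst hm
      cases fuel <;> simp [digitsLoop]
    · obtain ⟨f, rfl⟩ : ∃ f, fuel = f + 1 := ⟨fuel - 1, by omega⟩
      rw [digitsLoop]
      have hpos : (0 : Int) < (m : Int) := by exact_mod_cast hm
      have hfd : PySem.Int.floordiv (m : Int) 10 = ((m / 10 : Nat) : Int) := by
        exact_mod_cast PySem.Int.floordiv_natCast m 10
      have hmd : PySem.Int.mod (m : Int) 10 = ((m % 10 : Nat) : Int) := by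
        exact_mod_cast PySem.Int.mod_natCast m 10
      rw [if_pos hpos, hfd, hmd,
        ih (m / 10) (Nat.div_lt_self hm (by norm_num)) f (by omega)]
      rw [Nat.digits_def' (by norm_num : 1 < 10) hm]
      simp

-- A's loop result in terms of the digit list.
theorem checkLoop_eq (m : Nat) : ∀ (fuel : Nat), m ≤ fuel →
    ∀ (rev tong : Int) (ok : Bool),
    checkLoop fuel (m : Int) rev tong ok =
      (((Nat.digits 10 m).map (fun d : Nat => (d : Int))).foldl (fun a d => a * 10 + d) rev,
       tong + ((Nat.digits 10 m).map (fun d : Nat => (d : Int))).sum,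
       ok || (Nat.digits 10 m).any (fun d => d == 6)) := by
  induction m using Nat.strong_induction_on with
  | _ m ih =>
    intro fuel hfuel rev tong ok
    rcases Nat.eq_zero_or_pos m with hm | hm
    · subst hm
      cases fuel <;> simp [checkLoop]
    · obtain ⟨f, rfl⟩ : ∃ f, fuel = f + 1 := ⟨fuel - 1, by omega⟩
      rw [checkLoop]
      have hne : ((m : Int) ≠ 0) := by exact_mod_cast Nat.pos_iff_ne_zero.mp hm
      have hfd : PySem.Int.floordiv (m : Int) 10 = ((m / 10 : Nat) : Int) := by
        exact_mod_cast PySem.Int.floordiv_natCast m 10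
      have hmd : PySem.Int.mod (m : Int) 10 = ((m % 10 : Nat) : Int) := by
        exact_mod_cast PySem.Int.mod_natCast m 10
      rw [if_pos hne, hfd, hmd,
        ih (m / 10) (Nat.div_lt_self hm (by norm_num)) f (by omega)]
      rw [Nat.digits_def' (by norm_num : 1 < 10) hm]
      have hc : ((m : Int) % 10 = 6) ↔ m % 10 = 6 := by omega
      refine Prod.ext ?_ (Prod.ext ?_ ?_)
      · simp
      · simp; ring
      · by_cases h6 : m % 10 = 6 <;> cases ok <;> simp [h6, hc]

-- The big-endian fold over the digit list reads off Nat.ofDigits of the reversed list.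
theorem foldl_rev_eq (L : List Nat) : ∀ (r : Int),
    (L.map (fun d : Nat => (d : Int))).foldl (fun a d => a * 10 + d) r =
      ((Nat.ofDigits (10 : Nat) L.reverse : Nat) : Int) + r * 10 ^ L.length := by
  induction L with
  | nil => intro r; simp [Nat.ofDigits_nil]
  | cons d T ih =>
    intro r
    simp only [List.map_cons, List.foldl_cons, ih, List.reverse_cons,
      Nat.ofDigits_append, Nat.ofDigits_singleton, List.length_reverse, List.length_cons]
    push_cast
    ring

-- ===== VERDICT (by name: the statement is the Claim_ definition above) =====
theorem check_spec : Claim_equal_check := by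
  intro n _ hpre
  unfold Spec_check check check_alt
  obtain ⟨m, rfl⟩ : ∃ m : Nat, n = (m : Int) := ⟨n.toNat, (Int.toNat_of_nonneg hpre).symm⟩
  have hnat : (m : Int).natAbs = m := Int.natAbs_natCast m
  rw [hnat, checkLoop_eq m m le_rfl, digitsLoop_eq m m le_rfl]
  set L : List Nat := Nat.digits 10 m with hL
  set DL : List Int := L.map (fun d : Nat => (d : Int)) with hDL
  simp only [List.nil_append]
  rw [PySem.List.slice?_none_none_neg_one, Option.getD_some]
  have hlt : ∀ l ∈ L, l < 10 := fun l hl => Nat.digits_lt_base (by norm_num) hl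
  have hmap : DL.reverse = L.reverse.map (fun d : Nat => (d : Int)) := by
    rw [hDL, List.map_reverse]
  have h1 : ((DL.foldl (fun a d => a * 10 + d) 0 == (m : Int))) = (DL == DL.reverse) := by
    rw [hDL, foldl_rev_eq]
    simp only [zero_mul, add_zero, ← hDL]
    by_cases h : L.reverse = L
    · rw [hmap, h, hL]
      simp [Nat.ofDigits_digits 10 m]
      rw [hDL, hL]
    · have h2 : Nat.ofDigits 10 L.reverse ≠ m := by
        intro hEq
        apply h
        refine Nat.ofDigits_inj_of_len_eq (by norm_num) (by simp)
          (by simpa using hlt) hlt ?_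
        rw [hEq, hL]
        exact (Nat.ofDigits_digits 10 m).symm
      have h3 : DL ≠ DL.reverse := by
        rw [hmap, hDL]
        intro hEq
        exact h (((List.map_injective_iff.mpr
          (fun a b hab => by exact_mod_cast hab)) hEq).symm)
      have h2' : ((Nat.ofDigits (10 : Nat) L.reverse : Nat) : Int) ≠ (m : Int) := by
        exact_mod_cast h2
      simp [h2', h3]
  have h3 : (false || L.any (fun d => d == 6)) = DL.contains 6 := by
    rw [hDL, Bool.eq_iff_iff]
    simp only [Bool.false_or, List.any_eq_true, List.contains_iff_exists_mem_beq,
      List.mem_map, beq_iff_eq]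
    constructor
    · rintro ⟨a, ha, rfl⟩
      exact ⟨(6 : Int), ⟨6, ha, rfl⟩, rfl⟩
    · rintro ⟨x, ⟨a, ha, rfl⟩, hx⟩
      exact ⟨a, ha, by exact_mod_cast hx.symm⟩
  rw [h1, zero_add, h3]
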